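-- pv_equiv track=rewrite | github.com/m1-llie/MarauderMap-code | 1-Analysis-code/maraudermap.py | find_partial_subsequence
-- ===== SOURCE A (Python) =====
-- def find_partial_subsequence(seq, subseq, min_length=2):
--     if len(subseq) < min_length:
--         return []
--
--     partial_matches = []
--
--     for i in range(len(seq)):
--         match_count = 0
--         for j in range(len(subseq)):
--             if i + j < len(seq) and seq[i + j] == subseq[j]:
--                 match_count += 1
--             else:
--                 break
--         if match_count >= min_length:
--             partial_matches.append((tuple(seq[i:i + match_count]), i))
--
--     return partial_matches
-- ===== SOURCE B (Python) =====
-- def find_partial_subsequence(seq, subseq, min_length=2):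
--     if len(subseq) < min_length:
--         return []
--     n, m = len(seq), len(subseq)
--     comb = list(subseq) + [None] + list(seq)
--     t = len(comb)
--     z = [0] * t
--     l = r = 0
--     for k in range(1, t):
--         zk = min(r - k, z[k - l]) if k < r else 0
--         while k + zk < t and comb[zk] == comb[k + zk]:
--             zk += 1
--         z[k] = zk
--         if k + zk > r:
--             l, r = k, k + zk
--     res = []
--     for i in range(n):
--         mc = z[m + 1 + i]
--         if mc >= min_length:
--             res.append((tuple(seq[i:i + mc]), i))
--     return res
-- ===== Notes on version B (the rewrite author's own statement) =====
-- stated objective: faster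
-- what changed: Replaces A's per-position rescan of subseq against seq (nested loops) by a single Z-algorithm pass over subseq+[None]+seq that yields every match length in linear time.
import Mathlib
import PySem

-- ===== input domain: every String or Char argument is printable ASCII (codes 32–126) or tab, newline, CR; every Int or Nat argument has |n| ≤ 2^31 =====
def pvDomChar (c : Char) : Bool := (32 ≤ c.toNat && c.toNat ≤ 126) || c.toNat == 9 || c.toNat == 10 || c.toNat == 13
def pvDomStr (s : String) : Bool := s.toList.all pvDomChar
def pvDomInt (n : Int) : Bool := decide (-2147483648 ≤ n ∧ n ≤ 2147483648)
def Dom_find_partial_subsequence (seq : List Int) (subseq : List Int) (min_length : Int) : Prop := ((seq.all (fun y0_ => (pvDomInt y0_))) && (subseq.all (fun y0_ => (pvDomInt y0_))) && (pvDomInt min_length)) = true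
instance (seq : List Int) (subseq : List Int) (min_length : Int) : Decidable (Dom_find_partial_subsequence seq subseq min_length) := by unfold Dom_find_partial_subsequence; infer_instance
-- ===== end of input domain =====

-- B replaces A's per-position rescan (O(n*m)) by one Z-algorithm pass over subseq+[None]+seq (O(n+m)); objective: faster.

-- ===== PORT A =====
-- inner `for j in range(len(subseq))` loop with its break, carried count mc
def fpsInner (seq subseq : List Int) (i : Nat) (j : Nat) (mc : Nat) : Nat :=
  if j < subseq.length then
    if i + j < seq.length && (seq.getD (i + j) 0 == subseq.getD j 0) then
      fpsInner seq subseq i (j + 1) (mc + 1)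
    else mc
  else mc
termination_by subseq.length - j

def find_partial_subsequence (seq : List Int) (subseq : List Int) (min_length : Int) : List (List Int × Int) :=
  if (subseq.length : Int) < min_length then []
  else
    (List.range seq.length).foldl (fun partial_matches i =>
      let match_count := fpsInner seq subseq i 0 0
      if min_length ≤ (match_count : Int) then
        partial_matches ++ [(PySem.List.slice seq (some (i : Int)) (some ((i : Int) + (match_count : Int))), (i : Int))]
      else partial_matches) []

-- ===== PORT B =====
-- the `while k + zk < t and comb[zk] == comb[k + zk]: zk += 1` loop
def zExtend (cb : List (Option Int)) (k : Nat) (j : Nat) : Nat :=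
  if h : k + j < cb.length ∧ (cb.getD j none == cb.getD (k + j) none) then
    zExtend cb k (j + 1)
  else j
termination_by cb.length - (k + j)
decreasing_by omega

-- one iteration of the `for k in range(1, t)` loop; state (z, l, r)
def zStep (cb : List (Option Int)) (st : List Nat × Nat × Nat) (k : Nat) : List Nat × Nat × Nat :=
  let z := st.1
  let l := st.2.1
  let r := st.2.2
  let z0 := if k < r then min (r - k) (z.getD (k - l) 0) else 0
  let zk := zExtend cb k z0
  let z' := z.set k zk
  if r < k + zk then (z', k, k + zk) else (z', l, r)

-- z-array of comb (Python: z = [0]*t; l = r = 0; for k in range(1, t): ...)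
def zArray (cb : List (Option Int)) : List Nat :=
  ((List.range' 1 (cb.length - 1)).foldl (zStep cb) (List.replicate cb.length 0, 0, 0)).1

def find_partial_subsequence_alt (seq : List Int) (subseq : List Int) (min_length : Int) : List (List Int × Int) :=
  if (subseq.length : Int) < min_length then []
  else
    let n := seq.length
    let m := subseq.length
    let comb := subseq.map some ++ [none] ++ seq.map some
    let z := zArray comb
    (List.range n).foldl (fun res i =>
      let mc := z.getD (m + 1 + i) 0
      if min_length ≤ (mc : Int) then
        res ++ [(PySem.List.slice seq (some (i : Int)) (some ((i : Int) + (mc : Int))), (i : Int))]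
      else res) []

-- ===== PRECONDITION & SPEC =====
def Spec_find_partial_subsequence (seq : List Int) (subseq : List Int) (min_length : Int) (out : List (List Int × Int)) : Prop := out = find_partial_subsequence_alt seq subseq min_length
instance (seq : List Int) (subseq : List Int) (min_length : Int) (out : List (List Int × Int)) : Decidable (Spec_find_partial_subsequence seq subseq min_length out) := by unfold Spec_find_partial_subsequence; infer_instance

-- ===== CLAIM (what is proved, stated in full; the proofs are below) =====
def Claim_equal_find_partial_subsequence : Prop := ∀ (seq : List Int) (subseq : List Int) (min_length : Int), Dom_find_partial_subsequence seq subseq min_length → Spec_find_partial_subsequence seq subseq min_length (find_partial_subsequence seq subseq min_length)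

-- ===== LEMMAS AND PROOFS =====

-- length of the longest common prefix
def lcp {α : Type} [DecidableEq α] : List α → List α → Nat
  | a :: as, b :: bs => if a = b then lcp as bs + 1 else 0
  | _, _ => 0

theorem lcp_nil_right {α : Type} [DecidableEq α] (xs : List α) : lcp xs [] = 0 := by
  cases xs <;> rfl

theorem lcp_nil_left {α : Type} [DecidableEq α] (ys : List α) : lcp [] ys = 0 := by
  cases ys <;> rfl

-- pointwise characterisation, both directions
theorem lcp_pointwise {α : Type} [DecidableEq α] :
    ∀ (X Y : List α) (j : Nat), j < lcp X Y → ∃ v, X[j]? = some v ∧ Y[j]? = some v := by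
  intro X
  induction X with
  | nil => intro Y j h; simp [lcp] at h
  | cons a as ih =>
    intro Y j h
    cases Y with
    | nil => simp [lcp_nil_right] at h
    | cons b bs =>
      by_cases hab : a = b
      · cases j with
        | zero => exact ⟨a, by simp, by simp [hab]⟩
        | succ j' =>
          simp [lcp, hab] at h
          obtain ⟨v, h1, h2⟩ := ih bs j' (by omega)
          exact ⟨v, by simpa using h1, by simpa using h2⟩
      · simp [lcp, hab] at h

theorem lcp_ge_of_pointwise {α : Type} [DecidableEq α] :
    ∀ (X Y : List α) (m : Nat), (∀ j < m, ∃ v, X[j]? = some v ∧ Y[j]? = some v) → m ≤ lcp X Y := by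
  intro X
  induction X with
  | nil =>
    intro Y m h
    cases m with
    | zero => omega
    | succ m' => obtain ⟨v, h1, _⟩ := h 0 (by omega); simp at h1
  | cons a as ih =>
    intro Y m h
    cases m with
    | zero => omega
    | succ m' =>
      obtain ⟨v, h1, h2⟩ := h 0 (by omega)
      cases Y with
      | nil => simp at h2
      | cons b bs =>
        simp at h1 h2
        have hab : a = b := by rw [h1, h2]
        have : m' ≤ lcp as bs := by
          apply ih
          intro j hj
          obtain ⟨w, hw1, hw2⟩ := h (j + 1) (by omega)
          exact ⟨w, by simpa using hw1, by simpa using hw2⟩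
        simp [lcp, hab]; omega

theorem lcp_add_drop {α : Type} [DecidableEq α] :
    ∀ (j : Nat) (X Y : List α), j ≤ lcp X Y → lcp X Y = j + lcp (X.drop j) (Y.drop j) := by
  intro j
  induction j with
  | zero => intro X Y _; simp
  | succ j' ih =>
    intro X Y h
    cases X with
    | nil => simp [lcp] at h
    | cons a as =>
      cases Y with
      | nil => simp [lcp_nil_right] at h
      | cons b bs =>
        by_cases hab : a = b
        · simp only [lcp, if_pos hab] at h ⊢
          have := ih as bs (by omega)
          simp [List.drop_succ_cons]
          omega
        · simp [lcp, hab] at h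

-- mc computed by A's inner loop is the lcp of the tails
theorem fpsInner_eq (seq subseq : List Int) (i : Nat) :
    ∀ j mc, fpsInner seq subseq i j mc = mc + lcp (subseq.drop j) (seq.drop (i + j)) := by
  intro j
  induction hn : subseq.length - j using Nat.strong_induction_on generalizing j with
  | _ n ih =>
    intro mc
    unfold fpsInner
    by_cases hj : j < subseq.length
    · rw [if_pos hj]
      have hsub : subseq.drop j = subseq[j] :: subseq.drop (j + 1) := List.drop_eq_getElem_cons hj
      have egs : subseq.getD j 0 = subseq[j] := by
        rw [List.getD_eq_getElem?_getD, List.getElem?_eq_getElem hj]; rfl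
      by_cases hij : i + j < seq.length
      · have hseq : seq.drop (i + j) = seq[i + j] :: seq.drop (i + j + 1) := List.drop_eq_getElem_cons hij
        have egq : seq.getD (i + j) 0 = seq[i + j] := by
          rw [List.getD_eq_getElem?_getD, List.getElem?_eq_getElem hij]; rfl
        by_cases heq : seq[i + j] = subseq[j]
        · rw [if_pos (show (decide (i + j < seq.length) && (seq.getD (i + j) 0 == subseq.getD j 0)) = true by rw [egq, egs]; simp [hij, heq])]
          rw [ih (subseq.length - (j + 1)) (by omega) (j + 1) rfl (mc + 1)]
          rw [hsub, hseq]
          simp only [lcp, if_pos heq.symm]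
          have h1 : i + (j + 1) = i + j + 1 := by omega
          rw [h1]; omega
        · rw [if_neg (show ¬ (decide (i + j < seq.length) && (seq.getD (i + j) 0 == subseq.getD j 0)) = true by rw [egq, egs]; simp [heq])]
          rw [hsub, hseq]
          simp only [lcp, if_neg (show ¬ subseq[j] = seq[i + j] from fun h => heq h.symm)]
          omega
      · rw [if_neg (show ¬ (decide (i + j < seq.length) && (seq.getD (i + j) 0 == subseq.getD j 0)) = true by simp [hij])]
        rw [show seq.drop (i + j) = [] from List.drop_eq_nil_of_le (by omega), lcp_nil_right]
        omega
    · rw [if_neg hj]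
      rw [show subseq.drop j = [] from List.drop_eq_nil_of_le (by omega), lcp_nil_left]
      omega

-- the while loop extends j to j + lcp of the two tails
theorem zExtend_eq (cb : List (Option Int)) (k : Nat) :
    ∀ j, zExtend cb k j = j + lcp (cb.drop j) (cb.drop (k + j)) := by
  intro j
  induction hn : cb.length - (k + j) using Nat.strong_induction_on generalizing j with
  | _ n ih =>
    unfold zExtend
    by_cases h : k + j < cb.length ∧ (cb.getD j none == cb.getD (k + j) none)
    · rw [dif_pos h]
      obtain ⟨hlt, heq⟩ := h
      have hj : j < cb.length := by omega
      have hd1 : cb.drop j = cb[j] :: cb.drop (j + 1) := List.drop_eq_getElem_cons hj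
      have hd2 : cb.drop (k + j) = cb[k + j] :: cb.drop (k + j + 1) := List.drop_eq_getElem_cons hlt
      have e1 : cb.getD j none = cb[j] := by
        rw [List.getD_eq_getElem?_getD, List.getElem?_eq_getElem hj]; rfl
      have e2 : cb.getD (k + j) none = cb[k + j] := by
        rw [List.getD_eq_getElem?_getD, List.getElem?_eq_getElem hlt]; rfl
      have heq' : cb[j] = cb[k + j] := by
        rw [e1, e2] at heq
        exact eq_of_beq heq
      rw [ih (cb.length - (k + (j + 1))) (by omega) (j + 1) rfl]
      rw [hd1, hd2]
      simp only [lcp, if_pos heq']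
      have h1 : k + (j + 1) = k + j + 1 := by omega
      rw [h1]; omega
    · rw [dif_neg h]
      rcases Decidable.not_and_iff_not_or_not.mp h with h1 | h2
      · rw [show cb.drop (k + j) = [] from List.drop_eq_nil_of_le (by omega), lcp_nil_right]
        omega
      · by_cases hj : j < cb.length
        · by_cases hkj : k + j < cb.length
          · have e1 : cb.getD j none = cb[j] := by
              rw [List.getD_eq_getElem?_getD, List.getElem?_eq_getElem hj]; rfl
            have e2 : cb.getD (k + j) none = cb[k + j] := by
              rw [List.getD_eq_getElem?_getD, List.getElem?_eq_getElem hkj]; rfl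
            rw [List.drop_eq_getElem_cons hj, List.drop_eq_getElem_cons hkj]
            have hne : ¬ cb[j] = cb[k + j] := by
              intro hc
              exact h2 (by rw [e1, e2, hc]; simp)
            simp only [lcp, if_neg hne]
            omega
          · rw [show cb.drop (k + j) = [] from List.drop_eq_nil_of_le (by omega), lcp_nil_right]
            omega
        · rw [show cb.drop j = [] from List.drop_eq_nil_of_le (le_of_not_gt hj), lcp_nil_left]
          omega

-- loop invariant for the z loop
def ZInv (cb : List (Option Int)) (k : Nat) (st : List Nat × Nat × Nat) : Prop :=
  st.1.length = cb.length ∧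
  (∀ j, 1 ≤ j → j < k → st.1.getD j 0 = lcp cb (cb.drop j)) ∧
  st.2.1 < k ∧
  st.2.2 - st.2.1 ≤ lcp cb (cb.drop st.2.1) ∧
  (k < st.2.2 → 1 ≤ st.2.1)

theorem zStep_inv (cb : List (Option Int)) (k : Nat) (st : List Nat × Nat × Nat)
    (hk1 : 1 ≤ k) (hkc : k < cb.length) (hinv : ZInv cb k st) :
    ZInv cb (k + 1) (zStep cb st k) := by
  obtain ⟨hlen, hz, hlk, hwin, hl1⟩ := hinv
  obtain ⟨z, l, r⟩ := st
  simp only at hlen hz hlk hwin hl1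
  -- the starting value never exceeds the true lcp at k
  have hz0 : (if k < r then min (r - k) (z.getD (k - l) 0) else 0) ≤ lcp cb (cb.drop k) := by
    by_cases hkr : k < r
    · rw [if_pos hkr]
      have hl1' : 1 ≤ l := hl1 hkr
      have hkl1 : 1 ≤ k - l := by omega
      have hklk : k - l < k := by omega
      have hzkl : z.getD (k - l) 0 = lcp cb (cb.drop (k - l)) := hz _ hkl1 hklk
      apply lcp_ge_of_pointwise
      intro j hj
      rw [hzkl] at hj
      have hj1 : j < lcp cb (cb.drop (k - l)) := by omega
      have hj2 : j < r - k := by omega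
      obtain ⟨v, hv1, hv2⟩ := lcp_pointwise _ _ _ hj1
      rw [List.getElem?_drop] at hv2
      have hj3 : k - l + j < lcp cb (cb.drop l) := by omega
      obtain ⟨w, hw1, hw2⟩ := lcp_pointwise _ _ _ hj3
      rw [List.getElem?_drop] at hw2
      have hlkj : l + (k - l + j) = k + j := by omega
      rw [hlkj] at hw2
      have hvw : v = w := by
        rw [hv2] at hw1
        exact Option.some.inj hw1
      refine ⟨v, hv1, ?_⟩
      rw [List.getElem?_drop, hvw]
      exact hw2
    · rw [if_neg hkr]; omega
  set z0 := (if k < r then min (r - k) (z.getD (k - l) 0) else 0) with hz0def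
  have hzk : zExtend cb k z0 = lcp cb (cb.drop k) := by
    rw [zExtend_eq]
    have := lcp_add_drop z0 cb (cb.drop k) hz0
    rw [List.drop_drop] at this
    rw [Nat.add_comm k z0] at this ⊢
    omega
  unfold zStep
  simp only [← hz0def, hzk]
  have hget : ∀ j, 1 ≤ j → j < k + 1 → (z.set k (lcp cb (cb.drop k))).getD j 0 = lcp cb (cb.drop j) := by
    intro j hj1 hjk
    by_cases hjeq : j = k
    · subst hjeq
      rw [List.getD_eq_getElem?_getD, List.getElem?_set_self (by omega)]
      rfl
    · rw [List.getD_eq_getElem?_getD, List.getElem?_set_ne (by omega), ← List.getD_eq_getElem?_getD]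
      exact hz j hj1 (by omega)
  by_cases hr : r < k + lcp cb (cb.drop k)
  · rw [if_pos hr]
    refine ⟨by simpa using hlen, hget, ?_, ?_, ?_⟩
    · show k < k + 1
      omega
    · show k + lcp cb (cb.drop k) - k ≤ lcp cb (cb.drop k)
      omega
    · intro _
      show 1 ≤ k
      omega
  · rw [if_neg hr]
    refine ⟨by simpa using hlen, hget, ?_, ?_, ?_⟩
    · show l < k + 1
      omega
    · exact hwin
    · intro h'
      have h'' : k + 1 < r := h'
      exact hl1 (by omega)

theorem zFold_inv (cb : List (Option Int)) :
    ∀ (q k : Nat) (st : List Nat × Nat × Nat), 1 ≤ k → k + q ≤ cb.length → ZInv cb k st →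
      ZInv cb (k + q) ((List.range' k q).foldl (zStep cb) st) := by
  intro q
  induction q with
  | zero => intro k st _ _ h; simpa using h
  | succ q' ih =>
    intro k st hk1 hkq h
    rw [List.range'_succ, List.foldl_cons]
    have := ih (k + 1) (zStep cb st k) (by omega) (by omega) (zStep_inv cb k st hk1 (by omega) h)
    have harith : k + 1 + q' = k + (q' + 1) := by omega
    rwa [harith] at this

theorem zArray_eq (cb : List (Option Int)) (j : Nat) (hj1 : 1 ≤ j) (hjc : j < cb.length) :
    (zArray cb).getD j 0 = lcp cb (cb.drop j) := by
  unfold zArray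
  have hc1 : 1 ≤ cb.length := by omega
  have hinv0 : ZInv cb 1 (List.replicate cb.length 0, 0, 0) := by
    refine ⟨by simp, ?_, ?_, ?_, ?_⟩
    · intro j h1 h2; omega
    · show (0 : Nat) < 1
      omega
    · show (0 : Nat) - 0 ≤ lcp cb (cb.drop 0)
      exact Nat.zero_le _
    · intro h
      have h' : (1 : Nat) < 0 := h
      omega
  have := zFold_inv cb (cb.length - 1) 1 _ (by omega) (by omega) hinv0
  have harith : 1 + (cb.length - 1) = cb.length := by omega
  rw [harith] at this
  exact this.2.1 j hj1 hjc

-- removing the [none] sentinel and the subseq prefix from the first lcp argument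
theorem lcp_sentinel :
    ∀ (S : List (Option Int)) (R Q : List (Option Int)), (∀ x ∈ Q, x ≠ none) →
      lcp (S ++ none :: R) Q = lcp S Q := by
  intro S
  induction S with
  | nil =>
    intro R Q hQ
    cases Q with
    | nil => simp [lcp_nil_right]
    | cons b bs =>
      have hb : b ≠ none := hQ b (by simp)
      simp [lcp, Ne.symm hb]
  | cons a as ih =>
    intro R Q hQ
    cases Q with
    | nil => simp [lcp_nil_right]
    | cons b bs =>
      simp only [List.cons_append, lcp]
      rw [ih R bs (fun x hx => hQ x (by simp [hx]))]

theorem lcp_map_some : ∀ (X Y : List Int), lcp (X.map some) (Y.map some) = lcp X Y := by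
  intro X
  induction X with
  | nil => intro Y; simp [lcp]
  | cons a as ih =>
    intro Y
    cases Y with
    | nil => simp [lcp_nil_right]
    | cons b bs =>
      by_cases hab : a = b <;> simp [lcp, hab, ih]

-- fold congruence used to compare the two result loops
theorem foldl_congr_fun {α β : Type} :
    ∀ (L : List β) (f g : α → β → α) (acc : α), (∀ x ∈ L, ∀ a, f a x = g a x) →
      L.foldl f acc = L.foldl g acc := by
  intro L
  induction L with
  | nil => intro f g acc _; rfl
  | cons x xs ih =>
    intro f g acc h
    simp only [List.foldl_cons]
    rw [h x (by simp) acc]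
    exact ih f g _ (fun y hy a => h y (by simp [hy]) a)

-- the two match counts agree for every position i < seq.length
theorem match_counts_agree (seq subseq : List Int) (i : Nat) (hi : i < seq.length) :
    (zArray (subseq.map some ++ [none] ++ seq.map some)).getD (subseq.length + 1 + i) 0
      = fpsInner seq subseq i 0 0 := by
  set cb := subseq.map some ++ [none] ++ seq.map some with hc
  have hlen : cb.length = subseq.length + 1 + seq.length := by simp [hc]; omega
  have hidx : subseq.length + 1 + i < cb.length := by omega
  rw [zArray_eq cb _ (by omega) hidx]
  have hdrop : cb.drop (subseq.length + 1 + i) = (seq.map some).drop i := by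
    have h1 : cb = (subseq.map some ++ [none]) ++ seq.map some := by simp [hc]
    have h2 : subseq.length + 1 + i = (subseq.map some ++ [none]).length + i := by simp
    rw [h1, h2, List.drop_append]
    simp
  have h3 : cb = subseq.map some ++ (none :: seq.map some) := by simp [hc]
  rw [hdrop]
  conv_lhs => rw [h3]
  rw [lcp_sentinel (subseq.map some) (seq.map some) ((seq.map some).drop i)
        (by intro x hx; have := List.mem_of_mem_drop hx; simp at this; obtain ⟨v, _, hv⟩ := this; simp [← hv])]
  rw [← List.map_drop, lcp_map_some]
  rw [fpsInner_eq seq subseq i 0 0]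
  simp

-- ===== VERDICT (by name: the statement is the Claim_ definition above) =====
theorem find_partial_subsequence_spec : Claim_equal_find_partial_subsequence := by
  intro seq subseq min_length _
  unfold Spec_find_partial_subsequence find_partial_subsequence find_partial_subsequence_alt
  by_cases hml : (subseq.length : Int) < min_length
  · rw [if_pos hml, if_pos hml]
  · rw [if_neg hml, if_neg hml]
    simp only
    apply foldl_congr_fun
    intro i hi acc
    have hi' : i < seq.length := List.mem_range.mp hi
    simp only [match_counts_agree seq subseq i hi']
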